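-- pv_equiv track=rewrite | github.com/zofialuther/CS8395-08-Paper1-updated | data/translated-code/pseudo-to-python/java/Rep-string.py | repString
-- ===== SOURCE A (Python) =====
-- def repString(aText):
--     repetitions = []
--     for length in range(1, len(aText) // 2 + 1):
--         possible = aText[:length]
--         quotient = len(aText) // length
--         remainder = len(aText) % length
--         candidate = possible * quotient + possible[:remainder]
--         if candidate == aText:
--             repetitions.append(possible)
--     return repetitions
-- ===== SOURCE B (Python) =====
-- def repString(aText):
--     # Sieve over positions, scanned right to left: start with all candidate
--     # periods 1..n//2 and eliminate a period p as soon as some position i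
--     # disagrees with i-p; stop as soon as no candidate is left.
--     n = len(aText)
--     alive = list(range(1, n // 2 + 1))
--     for i in range(n - 1, 0, -1):
--         if not alive:
--             break
--         alive = [p for p in alive if i < p or aText[i] == aText[i - p]]
--     return [aText[:p] for p in alive]
-- ===== Notes on version B (the rewrite author's own statement) =====
-- stated objective: alternative
-- what changed: A loops over candidate lengths and rebuilds the whole repeated string for each; B sweeps the positions right-to-left once, keeping a shrinking sieve of still-alive periods (p survives iff every position i>=p agrees with i-p, with an early stop once the sieve is empty) and slices the prefixes at the end.
import Mathlib
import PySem

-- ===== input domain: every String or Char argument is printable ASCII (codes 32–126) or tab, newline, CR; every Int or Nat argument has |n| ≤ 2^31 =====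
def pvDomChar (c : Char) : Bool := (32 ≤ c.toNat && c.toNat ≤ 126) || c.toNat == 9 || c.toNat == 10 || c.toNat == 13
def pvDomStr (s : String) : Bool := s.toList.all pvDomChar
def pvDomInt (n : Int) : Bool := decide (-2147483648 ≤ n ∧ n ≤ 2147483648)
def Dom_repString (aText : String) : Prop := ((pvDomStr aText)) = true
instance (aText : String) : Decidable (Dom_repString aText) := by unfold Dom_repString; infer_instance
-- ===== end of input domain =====

-- B replaces A's rebuild-the-repetition check per length by a single sweep over positions
-- that sieves out non-periods; same output, genuinely different traversal (objective: alternative).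

-- ===== PORT A =====
-- port works on aText.toList; Python string slicing/repetition are the PySem list ops on code points (exact)
def repString (aText : String) : List String :=
  let s := aText.toList
  let n : Int := s.length
  (PySem.List.pyRange 1 (PySem.Int.floordiv n 2 + 1)).foldl
    (fun repetitions length =>
      let possible := PySem.List.slice s none (some length)
      let quotient := PySem.Int.floordiv n length
      let remainder := PySem.Int.mod n length
      let candidate := PySem.List.pyRepeat possible quotient ++ PySem.List.slice possible none (some remainder)
      if candidate = s then repetitions ++ [String.ofList possible] else repetitions)
    []

-- ===== PORT B =====
-- aText[i] / aText[i-p]: whenever the second disjunct is evaluated, 1 ≤ p ≤ i < n, so both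
-- indices are in range and pyGetD with a dummy default is exact (Python never raises here)
def repString_alt (aText : String) : List String :=
  let s := aText.toList
  let n : Int := s.length
  let alive0 := PySem.List.pyRange 1 (PySem.Int.floordiv n 2 + 1)
  -- the 'break' when the sieve is empty: an empty sieve stays empty, so the loop body
  -- degenerates to the identity from that point on (exact)
  let alive := (PySem.List.pyRange (n - 1) 0 (-1)).foldl
    (fun alive i =>
      if alive = [] then alive else
      alive.filter (fun p =>
        decide (i < p) || decide (PySem.List.pyGetD s i ' ' = PySem.List.pyGetD s (i - p) ' ')))
    alive0
  alive.map fun p => String.ofList (PySem.List.slice s none (some p))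

-- ===== PRECONDITION & SPEC =====
def Spec_repString (aText : String) (out : List String) : Prop := out = repString_alt aText
instance (aText : String) (out : List String) : Decidable (Spec_repString aText out) := by unfold Spec_repString; infer_instance

-- ===== CLAIM (what is proved, stated in full; the proofs are below) =====
def Claim_equal_repString : Prop := ∀ (aText : String), Dom_repString aText → Spec_repString aText (repString aText)

-- ===== LEMMAS AND PROOFS =====

-- the early break: once the sieve is empty the guarded body is the identity, and so is the filter
theorem foldl_filter_guard (is : List Int) (P : Int → Int → Bool) (l : List Int) :
    is.foldl (fun l i => if l = [] then l else l.filter (P i)) l =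
      is.foldl (fun l i => l.filter (P i)) l := by
  induction is generalizing l with
  | nil => rfl
  | cons i is ih =>
    simp only [List.foldl_cons]
    by_cases hl : l = []
    · subst hl
      rw [if_pos rfl, List.filter_nil]
      exact ih []
    · rw [if_neg hl]
      exact ih _

-- B's sieve: folding a filter over a list of positions is one filter by the conjunction
theorem foldl_filter_eq_filter_all (is : List Int) (P : Int → Int → Bool) (l : List Int) :
    is.foldl (fun l i => l.filter (P i)) l = l.filter (fun p => is.all (fun i => P i p)) := by
  induction is generalizing l with
  | nil => simp
  | cons i is ih =>
    simp only [List.foldl_cons, ih, List.filter_filter, List.all_cons]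
    exact List.filter_congr (fun a _ => by simp [Bool.and_comm])

-- prefix equality, element by element
theorem take_eq_iff (t v : List Char) (_h : v.length ≤ t.length) :
    t.take v.length = v ↔ ∀ i, i < v.length → v[i]? = t[i]? := by
  constructor
  · intro heq i hi
    rw [← heq, List.getElem?_take]
    simp [hi]
  · intro hall
    apply List.ext_getElem?
    intro i
    by_cases hi : i < v.length
    · rw [List.getElem?_take, ← hall i hi]
      simp [hi]
    · rw [List.getElem?_eq_none (by simp; omega), List.getElem?_eq_none (by omega)]

-- A's candidate: the repeated-prefix string equals u iff u is t-periodic position by position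
theorem rep_iff (t : List Char) (hp : 0 < t.length) (u : List Char) :
    (List.replicate (u.length / t.length) t).flatten ++ t.take (u.length % t.length) = u
      ↔ ∀ i, i < u.length → u[i]? = t[i % t.length]? := by
  suffices H : ∀ (n : Nat) (u : List Char), u.length = n →
      ((List.replicate (u.length / t.length) t).flatten ++ t.take (u.length % t.length) = u
        ↔ ∀ i, i < u.length → u[i]? = t[i % t.length]?) from H u.length u rfl
  intro n
  induction n using Nat.strong_induction_on with
  | _ n ih =>
    intro u hlen
    by_cases hcase : u.length < t.length
    · rw [Nat.div_eq_of_lt hcase, Nat.mod_eq_of_lt hcase]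
      simp only [List.replicate_zero, List.flatten_nil, List.nil_append]
      rw [take_eq_iff t u (le_of_lt hcase)]
      constructor
      · intro h i hi
        rw [h i hi, Nat.mod_eq_of_lt (lt_trans hi hcase)]
      · intro h i hi
        rw [h i hi, Nat.mod_eq_of_lt (lt_trans hi hcase)]
    · rw [Nat.not_lt] at hcase
      have hq : u.length / t.length = (u.length - t.length) / t.length + 1 :=
        Nat.div_eq_sub_div hp hcase
      have hm : u.length % t.length = (u.length - t.length) % t.length :=
        Nat.mod_eq_sub_mod hcase
      have hd : (u.drop t.length).length = u.length - t.length := by simp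
      have key := ih (u.length - t.length) (by omega) (u.drop t.length) hd
      rw [hd] at key
      rw [hq, hm, List.replicate_succ, List.flatten_cons, List.append_assoc]
      have split : t ++ ((List.replicate ((u.length - t.length) / t.length) t).flatten ++
            t.take ((u.length - t.length) % t.length)) = u ↔
          (u.take t.length = t ∧
            (List.replicate ((u.length - t.length) / t.length) t).flatten ++
              t.take ((u.length - t.length) % t.length) = u.drop t.length) := by
        constructor
        · intro h
          have h1 := congrArg (List.take t.length) h
          have h2 := congrArg (List.drop t.length) h
          rw [List.take_left] at h1
          rw [List.drop_left] at h2
          exact ⟨h1.symm, h2⟩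
        · rintro ⟨h1, h2⟩
          calc t ++ ((List.replicate ((u.length - t.length) / t.length) t).flatten ++
                t.take ((u.length - t.length) % t.length))
              = u.take t.length ++ u.drop t.length := by rw [h1, h2]
            _ = u := List.take_append_drop _ _
      have h1iff : (u.take t.length = t) ↔ ∀ i, i < t.length → u[i]? = t[i]? := by
        have h2 := take_eq_iff t (u.take t.length) (by simp)
        have hlp : (u.take t.length).length = t.length := by
          rw [List.length_take]; omega
        rw [hlp, List.take_length] at h2
        rw [eq_comm, h2]
        constructor
        · intro h i hi
          have h3 := h i hi
          rw [List.getElem?_take, if_pos hi] at h3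
          exact h3
        · intro h i hi
          rw [List.getElem?_take, if_pos hi]
          exact h i hi
      rw [split, key, h1iff]
      constructor
      · rintro ⟨ha, hb⟩ i hi
        by_cases hip : i < t.length
        · rw [ha i hip, Nat.mod_eq_of_lt hip]
        · have hb' := hb (i - t.length) (by omega)
          rw [List.getElem?_drop, show t.length + (i - t.length) = i by omega] at hb'
          rw [hb', show (i - t.length) % t.length = i % t.length from
            (Nat.mod_eq_sub_mod (by omega)).symm]
      · intro h
        refine ⟨?_, ?_⟩
        · intro i hi
          rw [h i (by omega), Nat.mod_eq_of_lt hi]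
        · intro i hi
          rw [List.getElem?_drop, h (t.length + i) (by omega), Nat.add_mod_left]

-- "u[i] = u[i mod p]" and "u[i] = u[i-p]" describe the same strings
theorem mod_iff_shift (s : List Char) (p : Nat) (hp : 0 < p) :
    (∀ i, i < s.length → s[i]? = s[i % p]?) ↔
      (∀ i, p ≤ i → i < s.length → s[i]? = s[i - p]?) := by
  constructor
  · intro h i hpi hin
    have e2 := h (i - p) (Nat.lt_of_le_of_lt (Nat.sub_le i p) hin)
    rw [h i hin, e2, show (i - p) % p = i % p from (Nat.mod_eq_sub_mod hpi).symm]
  · intro h i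
    induction i using Nat.strong_induction_on with
    | _ i ih =>
      intro hin
      by_cases hip : i < p
      · rw [Nat.mod_eq_of_lt hip]
      · rw [h i (by omega) hin, ih (i - p) (by omega) (by omega),
          show (i - p) % p = i % p from (Nat.mod_eq_sub_mod (by omega)).symm]

theorem getD_eq_iff_getElem? (s : List Char) (i j : Nat) (hi : i < s.length)
    (hj : j < s.length) (d : Char) :
    (s.getD i d = s.getD j d) ↔ (s[i]? = s[j]?) := by
  rw [List.getD_eq_getElem s d hi, List.getD_eq_getElem s d hj,
    List.getElem?_eq_getElem hi, List.getElem?_eq_getElem hj]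
  simp

-- pointwise: A's test at length p agrees with B's survival test, for 1 ≤ p ≤ n//2
theorem cond_iff (s : List Char) (p : Int) (h1 : 1 ≤ p)
    (h2 : p < PySem.Int.floordiv (s.length : Int) 2 + 1) :
    (PySem.List.pyRepeat (PySem.List.slice s none (some p))
        (PySem.Int.floordiv (s.length : Int) p) ++
      PySem.List.slice (PySem.List.slice s none (some p)) none
        (some (PySem.Int.mod (s.length : Int) p)) = s)
    ↔ ((PySem.List.pyRange ((s.length : Int) - 1) 0 (-1)).all (fun i =>
        decide (i < p) || decide (PySem.List.pyGetD s i ' ' = PySem.List.pyGetD s (i - p) ' '))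
        = true) := by
  have hp0 : (0:Int) < p := by omega
  lift p to Nat using (by omega : (0:Int) ≤ p) with pN
  have hpN : 0 < pN := by exact_mod_cast hp0
  rw [PySem.Int.floordiv_eq_ediv_of_pos (by norm_num)] at h2
  have hple : pN ≤ s.length := by omega
  rw [PySem.Int.floordiv_natCast, PySem.Int.mod_natCast,
      PySem.List.slice_to _ (Int.natCast_nonneg pN),
      PySem.List.slice_to _ (Int.natCast_nonneg (s.length % pN))]
  simp only [PySem.List.pyRepeat, Int.toNat_natCast]
  have ht : (s.take pN).length = pN := by rw [List.length_take]; omega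
  have R := rep_iff (s.take pN) (by rw [ht]; exact hpN) s
  rw [ht] at R
  rw [R]
  have R2 : (∀ i, i < s.length → s[i]? = (s.take pN)[i % pN]?) ↔
      ∀ i, i < s.length → s[i]? = s[i % pN]? := by
    refine forall_congr' fun i => imp_congr_right fun _ => ?_
    rw [List.getElem?_take, if_pos (Nat.mod_lt i hpN)]
  rw [R2, mod_iff_shift s pN hpN, List.all_eq_true]
  constructor
  · intro h x hx
    rw [PySem.List.mem_pyRange_neg_one] at hx
    obtain ⟨hx1, hx2⟩ := hx
    lift x to Nat using (by omega) with iN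
    simp only [Bool.or_eq_true, decide_eq_true_eq]
    by_cases hxp : (iN : Int) < (pN : Int)
    · left; exact hxp
    · right
      have hiN : pN ≤ iN := by exact_mod_cast Int.not_lt.mp hxp
      have hlt : iN < s.length := by omega
      rw [PySem.List.pyGetD_of_nonneg s ' ' (Int.natCast_nonneg iN),
          show ((iN : Int) - (pN : Int)) = ((iN - pN : Nat) : Int) by push_cast [hiN]; omega,
          PySem.List.pyGetD_of_nonneg s ' ' (Int.natCast_nonneg (iN - pN))]
      simp only [Int.toNat_natCast]
      rw [getD_eq_iff_getElem? s _ _ hlt (by omega)]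
      exact h iN hiN hlt
  · intro h iN hiN hlt
    have hx := h (iN : Int) (by rw [PySem.List.mem_pyRange_neg_one]; omega)
    simp only [Bool.or_eq_true, decide_eq_true_eq] at hx
    rcases hx with hx | hx
    · omega
    · rw [PySem.List.pyGetD_of_nonneg s ' ' (Int.natCast_nonneg iN),
          show ((iN : Int) - (pN : Int)) = ((iN - pN : Nat) : Int) by push_cast [hiN]; omega,
          PySem.List.pyGetD_of_nonneg s ' ' (Int.natCast_nonneg (iN - pN))] at hx
      simp only [Int.toNat_natCast] at hx
      rwa [getD_eq_iff_getElem? s _ _ hlt (by omega)] at hx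

-- ===== VERDICT (by name: the statement is the Claim_ definition above) =====
theorem repString_spec : Claim_equal_repString := by
  unfold Claim_equal_repString
  intro aText _
  show repString aText = repString_alt aText
  unfold repString repString_alt
  simp only [PySem.List.foldl_append_ite, List.nil_append]
  rw [foldl_filter_guard, foldl_filter_eq_filter_all]
  apply congrArg
  apply List.filter_congr
  intro p hp
  rw [PySem.List.mem_pyRange_one] at hp
  rw [Bool.eq_iff_iff, decide_eq_true_eq]
  exact cond_iff aText.toList p hp.1 hp.2
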